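-- pv_equiv track=rewrite | github.com/AlBi-HHU/longest-run-subsequence | longestrunsubsequence/util.py | get_selected_runs
-- ===== SOURCE A (Python) =====
-- def get_selected_runs(sub, ref):
-- 	'''
-- 	Returns the positions in ref, which are covered by the subsequence sub.
-- 	Returns None if sub is not a subsequence of ref
-- 	'''
-- 	indices = []
-- 	sub_pos = 0
-- 	for ref_pos in range(len(ref)):
-- 		if sub_pos >= len(sub):
-- 			break
-- 		if ref[ref_pos] == sub[sub_pos]:
-- 			indices.append(ref_pos)
-- 			sub_pos += 1
-- 	if sub_pos < len(sub):
-- 		return None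
-- 	else:
-- 		return indices
-- ===== SOURCE B (Python) =====
-- def get_selected_runs(sub, ref):
--     '''
--     Returns the positions in ref, which are covered by the subsequence sub.
--     Returns None if sub is not a subsequence of ref
--     '''
--     # index ref once: char -> sorted list of its positions
--     occ = {}
--     for i, ch in enumerate(ref):
--         occ.setdefault(ch, []).append(i)
--     indices = []
--     cursor = 0
--     for c in sub:
--         lst = occ.get(c, [])
--         # binary search (hand-written bisect_left): first lo with lst[lo] >= cursor
--         lo, hi = 0, len(lst)
--         while lo < hi:
--             mid = (lo + hi) // 2
--             if lst[mid] < cursor: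
--                 lo = mid + 1
--             else:
--                 hi = mid
--         if lo == len(lst):
--             return None
--         idx = lst[lo]
--         indices.append(idx)
--         cursor = idx + 1
--     return indices
-- ===== Notes on version B (the rewrite author's own statement) =====
-- stated objective: alternative
-- what changed: B replaces A's single matching scan over ref with a two-stage algorithm: it first builds a dictionary mapping each character to its sorted occurrence positions in ref, then for each character of sub binary-searches that occurrence list for the first position at or after a monotone cursor.
import Mathlib
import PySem

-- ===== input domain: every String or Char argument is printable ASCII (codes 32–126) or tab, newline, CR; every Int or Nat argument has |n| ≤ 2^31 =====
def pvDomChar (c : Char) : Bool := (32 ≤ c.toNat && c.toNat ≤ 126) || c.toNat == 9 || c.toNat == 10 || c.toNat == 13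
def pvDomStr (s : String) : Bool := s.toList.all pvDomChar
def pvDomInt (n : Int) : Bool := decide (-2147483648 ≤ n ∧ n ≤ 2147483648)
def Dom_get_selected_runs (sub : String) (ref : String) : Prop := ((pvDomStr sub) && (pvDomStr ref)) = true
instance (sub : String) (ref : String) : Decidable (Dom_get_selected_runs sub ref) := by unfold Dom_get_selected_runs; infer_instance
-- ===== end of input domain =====

-- B first builds a per-character index of occurrence positions in ref, then binary-searches it for each char of sub, instead of A's single matching scan over ref (alternative algorithm; similar cost).


-- ===== PORT A =====
-- A's for-loop over range(len(ref)) with break: structural recursion over the remaining ref chars,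
-- carrying ref_pos, sub_pos and the accumulated indices (same state as the Python).
def goA (subL : List Char) (refRem : List Char) (refPos : Nat) (subPos : Nat) (acc : List Int) :
    List Int × Nat :=
  match refRem with
  | [] => (acc, subPos)
  | c :: rest =>
    if subPos ≥ subL.length then (acc, subPos)          -- break
    else if c = subL.getD subPos ' ' then
      goA subL rest (refPos + 1) (subPos + 1) (acc ++ [(refPos : Int)])
    else
      goA subL rest (refPos + 1) subPos acc

def get_selected_runs (sub : String) (ref : String) : Option (List Int) :=
  let r := goA sub.toList ref.toList 0 0 []
  if r.2 < sub.toList.length then none else some r.1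

-- ===== PORT B =====
-- 'for i, ch in enumerate(ref): occ.setdefault(ch, []).append(i)' — a grouping fold over enumerate
-- (setdefault+append = modify with default []; the mutation is internal to occ).
def buildOcc (refL : List Char) : PySem.Dict Char (List Int) :=
  (PySem.List.enumerate refL).foldl (fun d q => d.modify q.2 [] (· ++ [q.1])) PySem.Dict.empty

-- Source B's hand-written bisect_left while-loop: lo/hi binary search; lo, hi stay in 0..len(lst),
-- so Nat with Nat division is exact for Python's nonnegative ints and (lo+hi)//2; lst[mid] is
-- always in range (lo ≤ mid < hi ≤ len), so getD is exact.
def blB (lst : List Int) (x : Int) (lo hi : Nat) : Nat :=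
  if lo < hi then
    if lst.getD ((lo + hi) / 2) 0 < x then blB lst x ((lo + hi) / 2 + 1) hi
    else blB lst x lo ((lo + hi) / 2)
  else lo
termination_by hi - lo
decreasing_by all_goals omega

-- B's loop over the characters of sub: look the char up in the index, binary-search the first
-- occurrence ≥ cursor, None if exhausted.
def goB (occ : PySem.Dict Char (List Int)) (subRem : List Char) (cursor : Int) (acc : List Int) :
    Option (List Int) :=
  match subRem with
  | [] => some acc
  | c :: rest =>
    let lst := occ.getD c []
    let lo := blB lst cursor 0 lst.length
    if lo = lst.length then none                         -- return None
    else
      let idx := lst.getD lo 0                           -- lst[lo], lo < len(lst)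
      goB occ rest (idx + 1) (acc ++ [idx])

def get_selected_runs_alt (sub : String) (ref : String) : Option (List Int) :=
  goB (buildOcc ref.toList) sub.toList 0 []

-- ===== PRECONDITION & SPEC =====
def Spec_get_selected_runs (sub : String) (ref : String) (out : Option (List Int)) : Prop := out = get_selected_runs_alt sub ref
instance (sub : String) (ref : String) (out : Option (List Int)) : Decidable (Spec_get_selected_runs sub ref out) := by unfold Spec_get_selected_runs; infer_instance

-- ===== CLAIM (what is proved, stated in full; the proofs are below) =====
def Claim_equal_get_selected_runs : Prop := ∀ (sub : String) (ref : String), Dom_get_selected_runs sub ref → Spec_get_selected_runs sub ref (get_selected_runs sub ref)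

-- ===== LEMMAS AND PROOFS =====

-- canonical greedy matcher both ports are reduced to
def greedy (refRem : List Char) (pos : Nat) (subRem : List Char) (acc : List Int) :
    Option (List Int) :=
  match subRem, refRem with
  | [], _ => some acc
  | _ :: _, [] => none
  | c :: srest, r :: rrest =>
    if r = c then greedy rrest (pos + 1) srest (acc ++ [(pos : Int)])
    else greedy rrest (pos + 1) (c :: srest) acc

-- first index ≥ pos in refRem (absolute) holding c — the semantic "earliest occurrence" function
def scanB (rem : List Char) (i : Nat) (c : Char) : Option Nat :=
  match rem with
  | [] => none
  | x :: xs => if x = c then some i else scanB xs (i + 1) c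

-- the occurrence positions of c in refL, numbered from n
def posFrom (refL : List Char) (n : Nat) (c : Char) : List Int :=
  match refL with
  | [] => []
  | x :: xs => if x = c then (n : Int) :: posFrom xs (n + 1) c else posFrom xs (n + 1) c

lemma goA_eq_greedy (subL : List Char) (refRem : List Char) :
    ∀ (refPos subPos : Nat) (acc : List Int),
      (if (goA subL refRem refPos subPos acc).2 < subL.length then none
       else some (goA subL refRem refPos subPos acc).1) =
      greedy refRem refPos (subL.drop subPos) acc := by
  induction refRem with
  | nil =>
    intro refPos subPos acc
    simp only [goA]
    rcases h : subL.drop subPos with _ | ⟨c, srest⟩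
    · have : subL.length ≤ subPos := by
        by_contra hlt
        push Not at hlt
        have := List.length_drop (l := subL) (i := subPos)
        rw [h] at this; simp at this; omega
      simp [greedy, Nat.not_lt.mpr this]
    · have : subPos < subL.length := by
        have := List.length_drop (l := subL) (i := subPos)
        rw [h] at this; simp at this; omega
      simp [greedy, this]
  | cons r rrest ih =>
    intro refPos subPos acc
    rcases h : subL.drop subPos with _ | ⟨c, srest⟩
    · have hge : subL.length ≤ subPos := by
        by_contra hlt
        push Not at hlt
        have := List.length_drop (l := subL) (i := subPos)
        rw [h] at this; simp at this; omega
      simp [goA, greedy, Nat.not_lt.mpr hge, hge]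
    · have hlt : subPos < subL.length := by
        have := List.length_drop (l := subL) (i := subPos)
        rw [h] at this; simp at this; omega
      have hget : subL.getD subPos ' ' = c := by
        have h0 : (List.drop subPos subL)[0]? = some c := by simp [h]
        rw [List.getElem?_drop] at h0
        simp only [Nat.add_zero] at h0
        simp [List.getD, h0]
      have hdropsucc : subL.drop (subPos + 1) = srest := by
        have : (subL.drop subPos).drop 1 = subL.drop (subPos + 1) := by
          rw [List.drop_drop]
        rw [h] at this; simpa using this.symm
      simp only [goA, ge_iff_le, Nat.not_le.mpr hlt, if_false, hget]
      by_cases hc : r = c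
      · simp only [if_pos hc, greedy, ← hdropsucc]
        exact ih (refPos + 1) (subPos + 1) (acc ++ [(refPos : Int)])
      · simp only [if_neg hc, greedy, ← h]
        have := ih (refPos + 1) subPos acc
        rw [this, h]

lemma scanB_none_greedy (srest : List Char) (acc : List Int) (c : Char) :
    ∀ (rem : List Char) (pos : Nat), scanB rem pos c = none →
      greedy rem pos (c :: srest) acc = none := by
  intro rem
  induction rem with
  | nil => intro pos _; simp [greedy]
  | cons x xs ih =>
    intro pos hscan
    simp only [scanB] at hscan
    by_cases hx : x = c
    · simp [hx] at hscan
    · simp only [if_neg hx] at hscan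
      simp [greedy, hx, ih _ hscan]

lemma scanB_some_greedy (srest : List Char) (acc : List Int) (c : Char) :
    ∀ (rem : List Char) (pos idx : Nat), scanB rem pos c = some idx →
      pos ≤ idx ∧
      greedy rem pos (c :: srest) acc =
        greedy (rem.drop (idx + 1 - pos)) (idx + 1) srest (acc ++ [(idx : Int)]) := by
  intro rem
  induction rem with
  | nil => intro pos idx h; simp [scanB] at h
  | cons x xs ih =>
    intro pos idx hscan
    simp only [scanB] at hscan
    by_cases hx : x = c
    · simp only [if_pos hx, Option.some.injEq] at hscan
      subst hscan
      refine ⟨le_refl _, ?_⟩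
      simp [greedy, hx]
    · simp only [if_neg hx] at hscan
      obtain ⟨hle, heq⟩ := ih (pos + 1) idx hscan
      refine ⟨by omega, ?_⟩
      simp only [greedy, if_neg hx, heq]
      have : idx + 1 - pos = (idx + 1 - (pos + 1)) + 1 := by omega
      rw [this]
      simp [List.drop_succ_cons]

-- the grouping fold really builds posFrom
lemma filter_enumerate_posFrom (c : Char) (refL : List Char) :
    ∀ (n : Nat),
      ((((PySem.List.enumerate refL (n : Int)).map (fun q => (q.2, q.1))).filter
          (fun p => p.1 == c)).map (·.2)) = posFrom refL n c := by
  induction refL with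
  | nil => intro n; simp [PySem.List.enumerate_nil, posFrom]
  | cons x xs ih =>
    intro n
    rw [PySem.List.enumerate_cons]
    have hih := ih (n + 1)
    by_cases hx : x = c
    · simp only [List.map_cons, List.filter_cons, posFrom, if_pos hx]
      simp only [hx, beq_self_eq_true, if_true, List.map_cons]
      rw [List.cons_eq_cons]
      exact ⟨rfl, by simpa using hih⟩
    · have hbeq : (x == c) = false := by simp [hx]
      simp only [List.map_cons, List.filter_cons, posFrom, if_neg hx]
      simp only [hbeq, Bool.false_eq_true, if_false]
      simpa using hih

lemma buildOcc_getD (refL : List Char) (c : Char) :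
    (buildOcc refL).getD c [] = posFrom refL 0 c := by
  unfold buildOcc
  have hfold :
      (PySem.List.enumerate refL).foldl (fun d q => d.modify q.2 [] (· ++ [q.1])) PySem.Dict.empty
        = (((PySem.List.enumerate refL).map (fun q => (q.2, q.1))).foldl
            (fun d p => d.modify p.1 [] (· ++ [p.2])) PySem.Dict.empty) := by
    rw [List.foldl_map]
  rw [hfold, PySem.Dict.getD_foldl_modify_append]
  simp only [PySem.Dict.getD_empty, List.nil_append]
  exact filter_enumerate_posFrom c refL 0

-- every position listed is ≥ its start
lemma posFrom_lb (c : Char) (refL : List Char) :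
    ∀ (n : Nat), ∀ v ∈ posFrom refL n c, (n : Int) ≤ v := by
  induction refL with
  | nil => intro n v hv; simp [posFrom] at hv
  | cons x xs ih =>
    intro n v hv
    simp only [posFrom] at hv
    by_cases hx : x = c
    · rw [if_pos hx] at hv
      rcases List.mem_cons.mp hv with h | h
      · omega
      · have := ih (n + 1) v h; push_cast at this ⊢; omega
    · rw [if_neg hx] at hv
      have := ih (n + 1) v hv; push_cast at this ⊢; omega

lemma posFrom_pairwise (c : Char) (refL : List Char) :
    ∀ (n : Nat), (posFrom refL n c).Pairwise (· < ·) := by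
  induction refL with
  | nil => intro n; simp [posFrom]
  | cons x xs ih =>
    intro n
    simp only [posFrom]
    by_cases hx : x = c
    · rw [if_pos hx]
      refine List.Pairwise.cons ?_ (ih (n + 1))
      intro v hv
      have := posFrom_lb c xs (n + 1) v hv
      push_cast at this ⊢; omega
    · rw [if_neg hx]; exact ih (n + 1)

-- strict increase, phrased on getD (the form blB reads the list in)
lemma posFrom_strict (c : Char) (refL : List Char) (n : Nat) :
    ∀ i j : Nat, i < j → j < (posFrom refL n c).length →
      (posFrom refL n c).getD i 0 < (posFrom refL n c).getD j 0 := by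
  intro i j hij hj
  have hp := posFrom_pairwise c refL n
  rw [List.pairwise_iff_getElem] at hp
  have hi : i < (posFrom refL n c).length := by omega
  rw [List.getD_eq_getElem _ _ hi, List.getD_eq_getElem _ _ hj]
  exact hp i j hi hj hij

-- hand-written bisect_left: the classic invariant, for a strictly increasing list
lemma blB_spec_fuel (lst : List Int) (x : Int)
    (hmono : ∀ i j : Nat, i < j → j < lst.length → lst.getD i 0 < lst.getD j 0) :
    ∀ (k lo hi : Nat), hi - lo ≤ k → lo ≤ hi → hi ≤ lst.length →
      (∀ j < lo, lst.getD j 0 < x) →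
      (∀ j, hi ≤ j → j < lst.length → x ≤ lst.getD j 0) →
      lo ≤ blB lst x lo hi ∧ blB lst x lo hi ≤ hi ∧
      (∀ j < blB lst x lo hi, lst.getD j 0 < x) ∧
      (∀ j, blB lst x lo hi ≤ j → j < lst.length → x ≤ lst.getD j 0) := by
  intro k
  induction k with
  | zero =>
    intro lo hi hk hle hhi hlo hhiP
    have heq : lo = hi := by omega
    rw [blB, if_neg (by omega)]
    exact ⟨le_refl _, hle, hlo, fun j _ h2 => hhiP j (by omega) h2⟩
  | succ k ih =>
    intro lo hi hk hle hhi hlo hhiP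
    by_cases hlt : lo < hi
    · rw [blB, if_pos hlt]
      have hmlo : lo ≤ (lo + hi) / 2 := by omega
      have hmhi : (lo + hi) / 2 < hi := by omega
      by_cases hcmp : lst.getD ((lo + hi) / 2) 0 < x
      · rw [if_pos hcmp]
        obtain ⟨h1, h2, h3, h4⟩ := ih ((lo + hi) / 2 + 1) hi (by omega) (by omega) hhi
          (by
            intro j hj
            rcases Nat.lt_or_ge j ((lo + hi) / 2) with h | h
            · exact lt_trans (hmono j ((lo + hi) / 2) h (by omega)) hcmp
            · have : j = (lo + hi) / 2 := by omega
              rw [this]; exact hcmp)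
          hhiP
        exact ⟨by omega, h2, h3, h4⟩
      · rw [if_neg hcmp]
        have hxmid : x ≤ lst.getD ((lo + hi) / 2) 0 := le_of_not_gt hcmp
        obtain ⟨h1, h2, h3, h4⟩ := ih lo ((lo + hi) / 2) (by omega) (by omega) (by omega) hlo
          (by
            intro j hj hjlen
            rcases Nat.lt_or_ge j ((lo + hi) / 2 + 1) with h | h
            · have : j = (lo + hi) / 2 := by omega
              rw [this]; exact hxmid
            · exact le_of_lt (lt_of_le_of_lt hxmid (hmono ((lo + hi) / 2) j (by omega) hjlen)))
        exact ⟨h1, by omega, h3, h4⟩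
    · rw [blB, if_neg hlt]
      exact ⟨le_refl _, hle, hlo, fun j h1 h2 => hhiP j (by omega) h2⟩

-- find? of a "first index" description
lemma find?_of_first (p : Int → Bool) :
    ∀ (lst : List Int) (r : Nat), r ≤ lst.length →
      (∀ j, j < r → p (lst.getD j 0) = false) →
      (∀ h : r < lst.length, p (lst.getD r 0) = true) →
      lst.find? p = if r = lst.length then none else some (lst.getD r 0) := by
  intro lst
  induction lst with
  | nil =>
    intro r hr _ _
    have : r = 0 := by simpa using hr
    subst this; simp
  | cons a tl ih =>
    intro r hr hlt hge
    cases r with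
    | zero =>
      have hpa : p a = true := by simpa using hge (by simp)
      simp [List.find?, hpa]
    | succ s =>
      have hpa : p a = false := by simpa using hlt 0 (by omega)
      have := ih s (by simpa using hr)
        (fun j hj => by simpa using hlt (j + 1) (by omega))
        (fun h => by simpa using hge (by simpa using h))
      simp only [List.find?, hpa]
      simp only [List.length_cons, List.getD_cons_succ]
      rw [this]
      by_cases hs : s = tl.length <;> simp [hs]

-- find? (cursor ≤ ·) on the occurrence list = earliest occurrence at/after cursor
lemma find?_all_ge (c : Char) (refL : List Char) (n : Nat) (cu : Nat) (hcu : cu ≤ n) :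
    (posFrom refL n c).find? (fun v => (cu : Int) ≤ v) = (posFrom refL n c).head? := by
  cases h : posFrom refL n c with
  | nil => simp
  | cons v tl =>
    have hv : (n : Int) ≤ v := posFrom_lb c refL n v (by rw [h]; simp)
    have : ((cu : Int) ≤ v) := by push_cast at hv ⊢; omega
    simp [List.find?, this]

lemma find?_posFrom_scanB (c : Char) (refL : List Char) :
    ∀ (n cu : Nat), n ≤ cu →
      (posFrom refL n c).find? (fun v => (cu : Int) ≤ v) =
        (scanB (refL.drop (cu - n)) cu c).map (fun m => (m : Int)) := by
  induction refL with
  | nil => intro n cu _; simp [posFrom, scanB]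
  | cons x xs ih =>
    intro n cu hle
    rcases Nat.eq_or_lt_of_le hle with heq | hlt
    · subst heq
      simp only [Nat.sub_self, List.drop_zero]
      simp only [posFrom, scanB]
      by_cases hx : x = c
      · simp [hx]
      · rw [if_neg hx, if_neg hx]
        rw [find?_all_ge c xs (n + 1) n (by omega),
          ← find?_all_ge c xs (n + 1) (n + 1) (le_refl _)]
        have := ih (n + 1) (n + 1) (le_refl _)
        simpa using this
    · have hsub : cu - n = (cu - (n + 1)) + 1 := by omega
      rw [hsub]
      simp only [posFrom, List.drop_succ_cons]
      by_cases hx : x = c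
      · rw [if_pos hx]
        have hnot : (decide ((cu : Int) ≤ (n : Int))) = false := by
          simp; omega
        simp only [List.find?, hnot]
        exact ih (n + 1) cu (by omega)
      · rw [if_neg hx]
        exact ih (n + 1) cu (by omega)

-- one B-step, reduced to scanB
lemma step_scan (refL : List Char) (c : Char) (cu : Nat) :
    (if blB ((buildOcc refL).getD c []) (cu : Int) 0 ((buildOcc refL).getD c []).length
          = ((buildOcc refL).getD c []).length then none
     else some (((buildOcc refL).getD c []).getD
          (blB ((buildOcc refL).getD c []) (cu : Int) 0 ((buildOcc refL).getD c []).length) 0)) =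
      (scanB (refL.drop cu) cu c).map (fun m => (m : Int)) := by
  simp only [buildOcc_getD]
  set lst := posFrom refL 0 c with hlst
  obtain ⟨h1, h2, h3, h4⟩ := blB_spec_fuel lst (cu : Int) (posFrom_strict c refL 0)
    lst.length 0 lst.length (by omega) (by omega) (le_refl _) (by omega) (by omega)
  have hfind := find?_of_first (fun v => decide ((cu : Int) ≤ v)) lst
    (blB lst (cu : Int) 0 lst.length)
    h2 (fun j hj => by simpa using not_le_of_gt (h3 j hj))
    (fun h => by simpa using h4 _ (le_refl _) h)
  have hmain := find?_posFrom_scanB c refL 0 cu (by omega)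
  simp only [Nat.sub_zero] at hmain
  rw [← hlst, hfind] at hmain
  exact hmain

lemma goB_eq_greedy (refL : List Char) :
    ∀ (subRem : List Char) (cu : Nat) (acc : List Int),
      goB (buildOcc refL) subRem (cu : Int) acc = greedy (refL.drop cu) cu subRem acc := by
  intro subRem
  induction subRem with
  | nil => intro cu acc; simp [goB, greedy]
  | cons c rest ih =>
    intro cu acc
    have hstep := step_scan refL c cu
    simp only [goB]
    by_cases h : blB ((buildOcc refL).getD c []) (cu : Int) 0 ((buildOcc refL).getD c []).length
        = ((buildOcc refL).getD c []).length
    · rw [if_pos h]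
      rw [if_pos h] at hstep
      rcases hscan : scanB (refL.drop cu) cu c with _ | m
      · exact (scanB_none_greedy rest acc c _ _ hscan).symm
      · rw [hscan] at hstep; simp at hstep
    · rw [if_neg h]
      rw [if_neg h] at hstep
      rcases hscan : scanB (refL.drop cu) cu c with _ | m
      · rw [hscan] at hstep; simp at hstep
      · rw [hscan] at hstep
        have hval : ((buildOcc refL).getD c []).getD (blB ((buildOcc refL).getD c [])
            (cu : Int) 0 ((buildOcc refL).getD c []).length) 0 = (m : Int) := by
          simpa using hstep
        obtain ⟨hle, heq⟩ := scanB_some_greedy rest acc c _ _ _ hscan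
        rw [hval, heq]
        have hcast : (m : Int) + 1 = ((m + 1 : Nat) : Int) := by push_cast; ring
        rw [hcast, ih (m + 1) (acc ++ [(m : Int)])]
        rw [List.drop_drop]
        congr 2
        omega

-- ===== VERDICT (by name: the statement is the Claim_ definition above) =====
theorem get_selected_runs_spec : Claim_equal_get_selected_runs := by
  intro sub ref _
  unfold Spec_get_selected_runs get_selected_runs get_selected_runs_alt
  have h0 : (0 : Int) = ((0 : Nat) : Int) := by norm_num
  rw [h0, goB_eq_greedy ref.toList sub.toList 0 []]
  simpa using goA_eq_greedy sub.toList ref.toList 0 0 []
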